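-- pv_equiv track=rewrite | github.com/sr8510/Ribo-seq-analysis | Gene level frameshift analysis/frameshift.py | tempoff
-- ===== SOURCE A (Python) =====
-- from collections import Counter, defaultdict
--
-- def tempoff(v_dist):
--     """
--     Given a list of candidate distances (v_dist), compute the mode that is higher
--     than its immediate neighbors. Mimics the RiboWaltz tempoff() function.
--     """
--     if not v_dist:
--         return None
--     counts = Counter(v_dist)
--     all_keys = list(range(min(v_dist), max(v_dist)+1))
--     freq = {k: counts.get(k, 0) for k in all_keys}
--     # Sort candidates in descending order of frequency
--     sorted_candidates = sorted(all_keys, key=lambda x: freq[x], reverse=True)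
--     for candidate in sorted_candidates:
--         left = freq.get(candidate - 1, 0)
--         right = freq.get(candidate + 1, 0)
--         if freq[candidate] > left and freq[candidate] > right:
--             return candidate
--     return None
-- ===== SOURCE B (Python) =====
-- from collections import Counter
--
-- def tempoff(v_dist):
--     """
--     Same result as the original: among values whose frequency strictly exceeds
--     that of both immediate neighbours, return the one with the highest
--     frequency (smallest value on ties); None if there is no such value.
--     Scans only the distinct observed values instead of the whole
--     min..max range, so the span of the values no longer matters.
--     """
--     if not v_dist:
--         return None
--     counts = Counter(v_dist)
--     best = None  # (key, count) of the best candidate so far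
--     for k, c in counts.items():
--         if c > counts.get(k - 1, 0) and c > counts.get(k + 1, 0):
--             if best is None or c > best[1] or (c == best[1] and k < best[0]):
--                 best = (k, c)
--     return best[0] if best is not None else None
-- ===== Notes on version B (the rewrite author's own statement) =====
-- stated objective: faster
-- what changed: B does one pass over the distinct observed values (Counter items), keeping the best strict-local-maximum candidate by (count desc, value asc), instead of materializing and frequency-sorting the whole min..max integer range and scanning it for the first hit.
import Mathlib
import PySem

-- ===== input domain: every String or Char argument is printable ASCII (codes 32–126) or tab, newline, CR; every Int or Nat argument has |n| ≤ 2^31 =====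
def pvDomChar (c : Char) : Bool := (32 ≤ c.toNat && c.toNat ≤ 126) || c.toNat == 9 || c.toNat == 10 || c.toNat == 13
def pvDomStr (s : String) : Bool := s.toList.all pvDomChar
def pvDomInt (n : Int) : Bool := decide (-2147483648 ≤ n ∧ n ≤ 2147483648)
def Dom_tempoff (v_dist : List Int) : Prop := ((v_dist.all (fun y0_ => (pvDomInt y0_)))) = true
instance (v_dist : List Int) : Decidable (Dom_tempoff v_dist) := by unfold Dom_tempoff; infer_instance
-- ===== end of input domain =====

-- B replaces A's scan over the whole min..max range (sorted by frequency) with a single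
-- pass over the distinct observed values, keeping the best strict-local-max candidate.

-- ===== PORT A =====
-- the 'for candidate in sorted_candidates: ... return candidate' loop
def tempoffFind (freq : Std.HashMap Int Int) : List Int → Option Int
  | [] => none
  | c :: rest =>
    let left := freq.getD (c - 1) 0
    let right := freq.getD (c + 1) 0
    if freq.getD c 0 > left ∧ freq.getD c 0 > right then some c
    else tempoffFind freq rest

def tempoff (v_dist : List Int) : Option Int :=
  if v_dist = [] then none else
  let counts := PySem.Dict.counter v_dist
  match PySem.List.min? v_dist (fun x => x), PySem.List.max? v_dist (fun x => x) with
  | some lo, some hi =>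
    let all_keys := PySem.List.pyRange lo (hi + 1)
    -- freq is only ever looked up (never iterated), so a hash map carries it exactly
    let freq : Std.HashMap Int Int := all_keys.foldl (fun d k => d.insert k (counts.getD k 0)) ∅
    -- Python's sorted(key=…, reverse=True) is a stable mergesort with every comparison
    -- reversed (ties keep list order); List.mergeSort with that comparison is exact here
    let sorted_candidates := all_keys.mergeSort (fun a b => decide (freq.getD b 0 ≤ freq.getD a 0))
    tempoffFind freq sorted_candidates
  | _, _ => none

-- ===== PORT B =====
-- the 'for k, c in counts.items(): ...' loop keeping the best (key, count) so far
def tempoffBest (counts : PySem.Dict Int Int) :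
    Option (Int × Int) → List (Int × Int) → Option (Int × Int)
  | best, [] => best
  | best, (k, c) :: rest =>
    let best' :=
      if c > counts.getD (k - 1) 0 ∧ c > counts.getD (k + 1) 0 then
        match best with
        | none => some (k, c)
        | some (bk, bc) => if c > bc ∨ (c = bc ∧ k < bk) then some (k, c) else some (bk, bc)
      else best
    tempoffBest counts best' rest

def tempoff_alt (v_dist : List Int) : Option Int :=
  if v_dist = [] then none else
  let counts := PySem.Dict.counter v_dist
  match tempoffBest counts none counts.items with
  | some (k, _) => some k
  | none => none

-- ===== PRECONDITION & SPEC =====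
def Spec_tempoff (v_dist : List Int) (out : Option Int) : Prop := out = tempoff_alt v_dist
instance (v_dist : List Int) (out : Option Int) : Decidable (Spec_tempoff v_dist out) := by unfold Spec_tempoff; infer_instance

-- ===== CLAIM (what is proved, stated in full; the proofs are below) =====
def Claim_equal_tempoff : Prop := ∀ (v_dist : List Int), Dom_tempoff v_dist → Spec_tempoff v_dist (tempoff v_dist)

-- ===== LEMMAS AND PROOFS =====

lemma pyRange_pairwise (a b : Int) : (PySem.List.pyRange a b).Pairwise (· < ·) := by
  simp only [PySem.List.pyRange]
  norm_num
  rw [List.pairwise_map]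
  exact List.pairwise_lt_range.imp (by intro k k' h; omega)

lemma pair_sublist_of_sorted {xs : List Int} {a b : Int} (h : xs.Pairwise (· < ·))
    (ha : a ∈ xs) (hb : b ∈ xs) (hab : a < b) : [a, b].Sublist xs := by
  induction xs with
  | nil => cases ha
  | cons x t ih =>
    rcases List.mem_cons.mp ha with rfl | hat
    · have hbt : b ∈ t := by
        rcases List.mem_cons.mp hb with rfl | hbt
        · omega
        · exact hbt
      exact List.Sublist.cons₂ _ (List.singleton_sublist.mpr hbt)
    · have hbt : b ∈ t := by
        rcases List.mem_cons.mp hb with rfl | hbt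
        · exact absurd (List.rel_of_pairwise_cons h hat) (by omega)
        · exact hbt
      exact List.Sublist.cons _ (ih (List.Pairwise.of_cons h) hat hbt)

lemma pair_sublist_antisymm {l : List Int} {a b : Int} (hnd : l.Nodup)
    (h1 : [a, b].Sublist l) (h2 : [b, a].Sublist l) : a = b := by
  induction l with
  | nil => simp at h1
  | cons x t ih =>
    rcases List.sublist_cons_iff.mp h1 with h1t | ⟨r1, hr1, hr1t⟩ <;>
      rcases List.sublist_cons_iff.mp h2 with h2t | ⟨r2, hr2, hr2t⟩
    · exact ih (List.Nodup.of_cons hnd) h1t h2t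
    · injection hr2 with hx hr2'
      subst hx
      exfalso
      have : b ∈ t := h1t.subset (by simp)
      exact (List.nodup_cons.mp hnd).1 this
    · injection hr1 with hx hr1'
      subst hx
      exfalso
      have : a ∈ t := h2t.subset (by simp)
      exact (List.nodup_cons.mp hnd).1 this
    · injection hr1 with hx1 _
      injection hr2 with hx2 _
      omega

lemma mergeSort_rev_lex (f : Int → Int) (xs : List Int) (h : xs.Pairwise (· < ·)) :
    (xs.mergeSort (fun a b => decide (f b ≤ f a))).Pairwise
      (fun a b => f b < f a ∨ (f a = f b ∧ a < b)) := by
  have htrans : ∀ (a b c : Int), (decide (f b ≤ f a)) = true → (decide (f c ≤ f b)) = true →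
      (decide (f c ≤ f a)) = true := by
    intro a b c h1 h2
    simp only [decide_eq_true_eq] at *
    omega
  have htot : ∀ (a b : Int), ((decide (f b ≤ f a)) || (decide (f a ≤ f b))) = true := by
    intro a b
    simp only [Bool.or_eq_true, decide_eq_true_eq]
    omega
  have hndxs : xs.Nodup := h.imp (fun hlt => ne_of_lt hlt)
  have hnd : (xs.mergeSort (fun a b => decide (f b ≤ f a))).Nodup :=
    ((List.mergeSort_perm xs _).nodup_iff).mpr hndxs
  rw [List.pairwise_iff_forall_sublist]
  intro a b hsub
  have hle : f b ≤ f a := by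
    have := List.pairwise_iff_forall_sublist.mp (List.pairwise_mergeSort htrans htot xs) hsub
    simpa using this
  rcases lt_or_eq_of_le hle with hlt | heq
  · exact Or.inl hlt
  · right
    refine ⟨heq.symm, ?_⟩
    have hab : a ≠ b := by
      have hpnd : ([a, b] : List Int).Nodup := hsub.nodup hnd
      simpa using hpnd
    have ham : a ∈ xs := List.mem_mergeSort.mp (hsub.subset (by simp))
    have hbm : b ∈ xs := List.mem_mergeSort.mp (hsub.subset (by simp))
    rcases lt_trichotomy a b with h1 | h1 | h1
    · exact h1
    · exact absurd h1 hab
    · exfalso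
      have hba : [b, a].Sublist xs := pair_sublist_of_sorted h hbm ham h1
      have hba' : [b, a].Sublist (xs.mergeSort (fun a b => decide (f b ≤ f a))) :=
        List.sublist_mergeSort htrans htot (by simp [heq]) hba
      exact hab (pair_sublist_antisymm hnd hsub hba')

lemma getD_foldl_insert (counts : PySem.Dict Int Int) (l : List Int)
    (d : Std.HashMap Int Int) (x : Int) :
    (l.foldl (fun d k => d.insert k (counts.getD k 0)) d).getD x 0
      = if x ∈ l then counts.getD x 0 else d.getD x 0 := by
  induction l generalizing d with
  | nil => simp
  | cons k t ih =>
    simp only [List.foldl_cons, ih, Std.HashMap.getD_insert, List.mem_cons, beq_iff_eq]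
    by_cases hxt : x ∈ t
    · simp [hxt]
    · by_cases hxk : k = x
      · subst hxk; simp [hxt]
      · simp [hxt, hxk, Ne.symm hxk]

lemma tempoffFind_none (freq : Std.HashMap Int Int) (S : List Int) :
    tempoffFind freq S = none ↔
      ∀ c ∈ S, ¬ (freq.getD c 0 > freq.getD (c - 1) 0 ∧ freq.getD c 0 > freq.getD (c + 1) 0) := by
  induction S with
  | nil => simp [tempoffFind]
  | cons a t ih =>
    by_cases ha : freq.getD a 0 > freq.getD (a - 1) 0 ∧ freq.getD a 0 > freq.getD (a + 1) 0
    · simp [tempoffFind, ha]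
    · simp only [tempoffFind, ha, if_false, ih, List.mem_cons]
      constructor
      · intro H c hc
        rcases hc with rfl | hc
        · exact ha
        · exact H c hc
      · intro H c hc
        exact H c (Or.inr hc)

lemma tempoffFind_some (freq : Std.HashMap Int Int) (S : List Int) (c : Int)
    (hp : S.Pairwise (fun a b => freq.getD b 0 < freq.getD a 0 ∨ (freq.getD a 0 = freq.getD b 0 ∧ a < b)))
    (h : tempoffFind freq S = some c) :
    c ∈ S ∧ (freq.getD c 0 > freq.getD (c - 1) 0 ∧ freq.getD c 0 > freq.getD (c + 1) 0) ∧
      ∀ y ∈ S, (freq.getD y 0 > freq.getD (y - 1) 0 ∧ freq.getD y 0 > freq.getD (y + 1) 0) →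
        c = y ∨ (freq.getD y 0 < freq.getD c 0 ∨ (freq.getD c 0 = freq.getD y 0 ∧ c < y)) := by
  induction S with
  | nil => simp [tempoffFind] at h
  | cons a t ih =>
    by_cases ha : freq.getD a 0 > freq.getD (a - 1) 0 ∧ freq.getD a 0 > freq.getD (a + 1) 0
    · simp only [tempoffFind, ha, and_self, if_true, Option.some.injEq] at h
      subst h
      refine ⟨List.mem_cons_self, ha, ?_⟩
      intro y hy hyP
      rcases List.mem_cons.mp hy with rfl | hy
      · exact Or.inl rfl
      · exact Or.inr (List.rel_of_pairwise_cons hp hy)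
    · simp only [tempoffFind, ha, if_false] at h
      obtain ⟨hc, hPc, hmin⟩ := ih (List.Pairwise.of_cons hp) h
      refine ⟨List.mem_cons_of_mem _ hc, hPc, ?_⟩
      intro y hy hyP
      rcases List.mem_cons.mp hy with rfl | hy
      · exact absurd hyP ha
      · exact hmin y hy hyP

def pvGood (d : PySem.Dict Int Int) (p : Int × Int) : Prop :=
  p.2 > d.getD (p.1 - 1) 0 ∧ p.2 > d.getD (p.1 + 1) 0

def pvBetter (p q : Int × Int) : Prop := p.2 > q.2 ∨ (p.2 = q.2 ∧ p.1 < q.1)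

lemma tempoffBest_none (d : PySem.Dict Int Int) (l : List (Int × Int)) (b : Option (Int × Int)) :
    tempoffBest d b l = none ↔ b = none ∧ ∀ p ∈ l, ¬ pvGood d p := by
  induction l generalizing b with
  | nil => simp [tempoffBest]
  | cons q rest ih =>
    obtain ⟨k0, c0⟩ := q
    by_cases hg : c0 > d.getD (k0 - 1) 0 ∧ c0 > d.getD (k0 + 1) 0
    · have hgood : pvGood d (k0, c0) := hg
      cases b with
      | none =>
        simp only [tempoffBest, hg, and_self, if_true, ih]
        simp [hgood]
      | some bp =>
        obtain ⟨bk, bc⟩ := bp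
        simp only [tempoffBest, hg, and_self, if_true, ih]
        by_cases hbet : c0 > bc ∨ (c0 = bc ∧ k0 < bk) <;> simp [hbet, hgood]
    · have hgood : ¬ pvGood d (k0, c0) := hg
      simp only [tempoffBest, hg, if_false, ih]
      simp [hgood]

lemma tempoffBest_some (d : PySem.Dict Int Int) (l : List (Int × Int)) (b : Option (Int × Int))
    (k c : Int) (h : tempoffBest d b l = some (k, c)) :
    (b = some (k, c) ∨ ((k, c) ∈ l ∧ pvGood d (k, c))) ∧
      (∀ p ∈ l, pvGood d p → ¬ pvBetter p (k, c)) ∧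
      (∀ bp, b = some bp → ¬ pvBetter bp (k, c)) := by
  induction l generalizing b with
  | nil =>
    simp only [tempoffBest] at h
    refine ⟨Or.inl h, by simp, ?_⟩
    intro bp hb
    rw [h] at hb
    injection hb with hb
    subst hb
    simp [pvBetter]
  | cons q rest ih =>
    obtain ⟨k0, c0⟩ := q
    by_cases hg : c0 > d.getD (k0 - 1) 0 ∧ c0 > d.getD (k0 + 1) 0
    · have hgood : pvGood d (k0, c0) := hg
      cases b with
      | none =>
        simp only [tempoffBest, hg, and_self, if_true] at h
        obtain ⟨h1, h2, h3⟩ := ih _ h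
        have hnb : ¬ pvBetter (k0, c0) (k, c) := h3 _ rfl
        refine ⟨?_, ?_, by intro bp hb; simp at hb⟩
        · rcases h1 with h1 | ⟨hm, hgd⟩
          · injection h1 with h1; exact Or.inr ⟨by rw [← h1]; exact List.mem_cons_self, by rw [← h1]; exact hgood⟩
          · exact Or.inr ⟨List.mem_cons_of_mem _ hm, hgd⟩
        · intro p hp hpg
          rcases List.mem_cons.mp hp with rfl | hp
          · exact hnb
          · exact h2 p hp hpg
      | some bp =>
        obtain ⟨bk, bc⟩ := bp
        by_cases hbet : c0 > bc ∨ (c0 = bc ∧ k0 < bk)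
        · simp only [tempoffBest, hg, and_self, hbet, if_pos] at h
          obtain ⟨h1, h2, h3⟩ := ih _ h
          have hnb : ¬ pvBetter (k0, c0) (k, c) := h3 _ rfl
          refine ⟨?_, ?_, ?_⟩
          · rcases h1 with h1 | ⟨hm, hgd⟩
            · injection h1 with h1; exact Or.inr ⟨by rw [← h1]; exact List.mem_cons_self, by rw [← h1]; exact hgood⟩
            · exact Or.inr ⟨List.mem_cons_of_mem _ hm, hgd⟩
          · intro p hp hpg
            rcases List.mem_cons.mp hp with rfl | hp
            · exact hnb
            · exact h2 p hp hpg
          · intro bp hbp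
            injection hbp with hbp
            subst hbp
            simp only [pvBetter] at hnb ⊢
            rcases hbet with hb2 | hb2 <;> omega
        · simp only [tempoffBest, hg, and_self, if_true] at h
          rw [if_neg hbet] at h
          obtain ⟨h1, h2, h3⟩ := ih _ h
          have hnb : ¬ pvBetter (bk, bc) (k, c) := h3 _ rfl
          refine ⟨?_, ?_, ?_⟩
          · rcases h1 with h1 | ⟨hm, hgd⟩
            · exact Or.inl h1
            · exact Or.inr ⟨List.mem_cons_of_mem _ hm, hgd⟩
          · intro p hp hpg
            rcases List.mem_cons.mp hp with rfl | hp
            · simp only [pvBetter] at hnb ⊢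
              simp only [not_or, not_and, not_lt] at hbet
              omega
            · exact h2 p hp hpg
          · intro bp hbp
            injection hbp with hbp
            subst hbp
            exact hnb
    · have hgood : ¬ pvGood d (k0, c0) := hg
      simp only [tempoffBest, hg, if_false] at h
      obtain ⟨h1, h2, h3⟩ := ih _ h
      refine ⟨?_, ?_, h3⟩
      · rcases h1 with h1 | ⟨hm, hgd⟩
        · exact Or.inl h1
        · exact Or.inr ⟨List.mem_cons_of_mem _ hm, hgd⟩
      · intro p hp hpg
        rcases List.mem_cons.mp hp with rfl | hp
        · exact absurd hpg hgood
        · exact h2 p hp hpg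

-- ===== VERDICT (by name: the statement is the Claim_ definition above) =====
theorem tempoff_spec : Claim_equal_tempoff := by
  intro v _
  unfold Spec_tempoff
  by_cases hnil : v = []
  · simp [tempoff, tempoff_alt, hnil]
  · rcases hlo : PySem.List.min? v (fun x => x) with _ | lo
    · exact absurd ((PySem.List.min?_eq_none_iff _ _).mp hlo) hnil
    rcases hhi : PySem.List.max? v (fun x => x) with _ | hi
    · exact absurd ((PySem.List.max?_eq_none_iff _ _).mp hhi) hnil
    have hlo_min : ∀ x ∈ v, lo ≤ x := fun x hx => PySem.List.min?_isMin hlo x hx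
    have hhi_max : ∀ x ∈ v, x ≤ hi := fun x hx => PySem.List.max?_isMax hhi x hx
    simp only [tempoff, tempoff_alt, hnil, if_false, hlo, hhi]
    set cnt : Int → Int := fun x => (v.count x : Int) with hcnt
    set freq : Std.HashMap Int Int :=
      (PySem.List.pyRange lo (hi + 1)).foldl
        (fun d k => d.insert k ((PySem.Dict.counter v).getD k 0)) ∅ with hfreqdef
    set S : List Int :=
      (PySem.List.pyRange lo (hi + 1)).mergeSort
        (fun a b => decide (freq.getD b 0 ≤ freq.getD a 0)) with hSdef
    -- freq.getD agrees with the true multiplicity everywhere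
    have hfreq : ∀ x, freq.getD x 0 = cnt x := by
      intro x
      rw [hfreqdef, getD_foldl_insert]
      by_cases hx : x ∈ PySem.List.pyRange lo (hi + 1)
      · simp [hx, PySem.Dict.getD_counter, hcnt]
      · have hxv : x ∉ v := by
          intro hxv
          exact hx (PySem.List.mem_pyRange_one.mpr ⟨hlo_min x hxv, by have := hhi_max x hxv; omega⟩)
        simp [hx, hcnt, List.count_eq_zero.mpr hxv]
    have hmemS : ∀ x ∈ v, x ∈ S := by
      intro x hx
      rw [hSdef, List.mem_mergeSort, PySem.List.mem_pyRange_one]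
      exact ⟨hlo_min x hx, by have := hhi_max x hx; omega⟩
    have hPmem : ∀ c, cnt c > cnt (c - 1) → c ∈ v := by
      intro c hc
      have : 0 < v.count c := by
        have h0 : (0 : Int) ≤ cnt (c - 1) := by simp [hcnt]
        simp only [hcnt] at hc h0 ⊢
        omega
      exact List.count_pos_iff.mp this
    have hitems : (PySem.Dict.counter v).items
        = (PySem.Set.ofList v).map (fun k => (k, (v.count k : Int))) :=
      PySem.Dict.items_counter v
    have hSpair : S.Pairwise (fun a b => freq.getD b 0 < freq.getD a 0 ∨
        (freq.getD a 0 = freq.getD b 0 ∧ a < b)) := by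
      rw [hSdef]
      exact mergeSort_rev_lex _ _ (pyRange_pairwise lo (hi + 1))
    -- good items correspond exactly to A's candidates
    cases hA : tempoffFind freq S with
    | none =>
      have hnoP : ∀ c ∈ S, ¬ (cnt c > cnt (c - 1) ∧ cnt c > cnt (c + 1)) := by
        intro c hc hP
        exact (tempoffFind_none freq S).mp hA c hc (by rw [hfreq, hfreq, hfreq]; exact hP)
      have hB : tempoffBest (PySem.Dict.counter v) none (PySem.Dict.counter v).items = none := by
        apply (tempoffBest_none _ _ _).mpr
        refine ⟨rfl, ?_⟩
        intro p hp
        rw [hitems] at hp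
        obtain ⟨a, ha, rfl⟩ := List.mem_map.mp hp
        have hav : a ∈ v := (PySem.Set.mem_ofList v a).mp ha
        intro hg
        obtain ⟨hg1, hg2⟩ := hg
        simp only [PySem.Dict.getD_counter] at hg1 hg2
        exact hnoP a (hmemS a hav) ⟨by simpa [hcnt] using hg1, by simpa [hcnt] using hg2⟩
      rw [hB]
    | some c =>
      obtain ⟨hcS, hPc', hmin⟩ := tempoffFind_some freq S c hSpair hA
      rw [hfreq, hfreq, hfreq] at hPc'
      have hcv : c ∈ v := hPmem c hPc'.1
      have hcitem : (c, (v.count c : Int)) ∈ (PySem.Dict.counter v).items := by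
        rw [hitems]
        exact List.mem_map.mpr ⟨c, (PySem.Set.mem_ofList v c).mpr hcv, rfl⟩
      have hcgood : pvGood (PySem.Dict.counter v) (c, (v.count c : Int)) := by
        constructor <;> simp only [PySem.Dict.getD_counter] <;>
          [exact (by simpa [hcnt] using hPc'.1); exact (by simpa [hcnt] using hPc'.2)]
      cases hB : tempoffBest (PySem.Dict.counter v) none (PySem.Dict.counter v).items with
      | none =>
        exact absurd hcgood (((tempoffBest_none _ _ _).mp hB).2 _ hcitem)
      | some p =>
        obtain ⟨k, kc⟩ := p
        obtain ⟨h1, h2, _⟩ := tempoffBest_some _ _ _ _ _ hB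
        rcases h1 with h1 | ⟨hkm, hkg⟩
        · exact absurd h1 (by simp)
        · rw [hitems] at hkm
          obtain ⟨a, ha, hae⟩ := List.mem_map.mp hkm
          injection hae with hae1 hae2
          subst hae1
          subst hae2
          have hkv : a ∈ v := (PySem.Set.mem_ofList v a).mp ha
          have hPk : cnt a > cnt (a - 1) ∧ cnt a > cnt (a + 1) := by
            obtain ⟨hg1, hg2⟩ := hkg
            simp only [PySem.Dict.getD_counter] at hg1 hg2
            exact ⟨by simpa [hcnt] using hg1, by simpa [hcnt] using hg2⟩
          have hck := hmin a (hmemS a hkv) (by rw [hfreq, hfreq, hfreq]; exact hPk)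
          have hnb := h2 _ hcitem hcgood
          simp only [hfreq] at hck
          simp only [pvBetter, not_or, not_and, not_lt] at hnb
          have : c = a := by
            rcases hck with rfl | hck
            · rfl
            · obtain ⟨hnb1, hnb2⟩ := hnb
              simp only [hcnt] at hck
              omega
          rw [this]
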